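-- pv_equiv track=rewrite | github.com/MikaSchaechinger/ParameterInterpreter | src/parameter_interpreter.py | combine_until_closing_bracket
-- ===== SOURCE A (Python) =====
-- class ParameterException(Exception):
--     pass
--
-- def combine_until_closing_bracket(arg_list: list[str]) ->list[str]:
--     bracket_counter = 0
--     combine_index: list[tuple[int, int]] = []
--
--     for index in range(len(arg_list)):
--         string = arg_list[index]
--
--         if bracket_counter > 0:
--             combine_index.append((index-1, index))
--
--         if not '(' in string:
--             continue
--
--
--         for character in string:
--             if character == '(':
--                 bracket_counter += 1
--             elif character == ')':
--                 bracket_counter -= 1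
--
--             if bracket_counter < 0:
--                 raise ParameterException(f"Error: There were more closing brackets then opening brackets")
--
--     combine_index.reverse()
--     for index_tuple in combine_index:
--         first, second = index_tuple
--         arg_list[first] += arg_list[second]
--         del arg_list[second]
--
--     return arg_list
-- ===== SOURCE B (Python) =====
-- # B (simpler): single forward pass appending to the last group (A's return value only; A also mutates arg_list in place).
-- class ParameterException(Exception):
--     pass
--
-- def combine_until_closing_bracket(arg_list: list[str]) -> list[str]:
--     result: list[str] = []
--     depth = 0
--     for s in arg_list:
--         if depth > 0 and result:
--             result[-1] += s
--         else:
--             result.append(s)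
--         if '(' in s:
--             for c in s:
--                 if c == '(':
--                     depth += 1
--                 elif c == ')':
--                     depth -= 1
--                 if depth < 0:
--                     raise ParameterException("Error: There were more closing brackets then opening brackets")
--     return result
-- ===== Notes on version B (the rewrite author's own statement) =====
-- stated objective: simpler
-- what changed: Instead of recording (index-1,index) pairs in a first loop and then merging them by reversed in-place deletions from the list, B builds the output in one forward pass, appending each item to the last output group while the bracket depth is positive.
import Mathlib
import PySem

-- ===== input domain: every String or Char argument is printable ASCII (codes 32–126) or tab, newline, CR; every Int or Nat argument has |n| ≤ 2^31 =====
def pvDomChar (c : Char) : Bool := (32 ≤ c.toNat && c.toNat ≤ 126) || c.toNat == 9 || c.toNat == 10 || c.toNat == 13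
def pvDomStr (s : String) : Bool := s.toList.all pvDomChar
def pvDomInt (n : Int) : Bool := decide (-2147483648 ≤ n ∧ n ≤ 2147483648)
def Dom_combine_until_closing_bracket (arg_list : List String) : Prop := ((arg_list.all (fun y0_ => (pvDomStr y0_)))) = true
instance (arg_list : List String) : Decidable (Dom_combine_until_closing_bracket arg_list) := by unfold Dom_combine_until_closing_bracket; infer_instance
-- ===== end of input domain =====

-- B replaces A's reverse-deletion merging with a single forward pass that appends to the last
-- output group; equivalence is about the RETURN value only (Python A also mutates arg_list in place).

-- ===== PORT A =====
-- the inner 'for character in string' bracket-counting loop (identical in A and B);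
-- on inputs admitted by Pre_ the Python raise never fires, so the plain fold is exact there
def cubCount (bc : Int) (s : List Char) : Int :=
  s.foldl (fun b c => if c = '(' then b + 1 else if c = ')' then b - 1 else b) bc

-- first loop of A: build (bracket_counter, combine_index); arg_list[index] with index ∈ range(len) is exact as getD
def cubScanA (arg_list : List String) : Int × List (Nat × Nat) :=
  (List.range arg_list.length).foldl
    (fun st index =>
      let string := arg_list.getD index ""
      let ci := if st.1 > 0 then st.2 ++ [(index - 1, index)] else st.2
      if string.toList.contains '(' then (cubCount st.1 string.toList, ci) else (st.1, ci))
    (0, [])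

-- second loop of A: arg_list[first] += arg_list[second]; del arg_list[second]
def cubMergeA (l : List String) (pairs : List (Nat × Nat)) : List String :=
  pairs.foldl
    (fun cur p =>
      let cur' := cur.modify p.1 (fun x => x ++ cur.getD p.2 "")
      cur'.take p.2 ++ cur'.drop (p.2 + 1))
    l

def combine_until_closing_bracket (arg_list : List String) : List String :=
  cubMergeA arg_list (cubScanA arg_list).2.reverse

-- ===== PORT B =====
-- one step of B's loop body: grow the last group while depth > 0, else open a new group (result kept reversed)
def cubStepB (st : Int × List String) (s : String) : Int × List String :=
  let acc := match st.2, decide (st.1 > 0) with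
    | h :: t, true => (h ++ s) :: t
    | r, _ => s :: r
  (if s.toList.contains '(' then cubCount st.1 s.toList else st.1, acc)

def combine_until_closing_bracket_alt (arg_list : List String) : List String :=
  ((arg_list.foldl cubStepB ((0 : Int), ([] : List String))).2).reverse

-- ===== PRECONDITION & SPEC =====
-- Pre_ excludes exactly the inputs on which Python A raises ParameterException: some prefix of the
-- character stream of the '('-containing items has more ')' than '(' (B raises there as well).
def Pre_combine_until_closing_bracket (arg_list : List String) : Prop :=
  ∀ i < ((arg_list.filter (fun s => s.toList.contains '(')).flatMap String.toList).length + 1,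
    (((arg_list.filter (fun s => s.toList.contains '(')).flatMap String.toList).take i).count ')'
      ≤ (((arg_list.filter (fun s => s.toList.contains '(')).flatMap String.toList).take i).count '('
instance (arg_list : List String) : Decidable (Pre_combine_until_closing_bracket arg_list) := by
  unfold Pre_combine_until_closing_bracket; infer_instance
def pvWitness_combine_until_closing_bracket : List String := ["(a", "b", "c)", "d"]
def Spec_combine_until_closing_bracket (arg_list : List String) (out : List String) : Prop := out = combine_until_closing_bracket_alt arg_list
instance (arg_list : List String) (out : List String) : Decidable (Spec_combine_until_closing_bracket arg_list out) := by unfold Spec_combine_until_closing_bracket; infer_instance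

-- ===== CLAIM (what is proved, stated in full; the proofs are below) =====
def Claim_equal_combine_until_closing_bracket : Prop := ∀ (arg_list : List String), Dom_combine_until_closing_bracket arg_list → Pre_combine_until_closing_bracket arg_list → Spec_combine_until_closing_bracket arg_list (combine_until_closing_bracket arg_list)

-- ===== LEMMAS AND PROOFS =====

-- depth update for one item (shared shape of both loops)
def cubStep (d : Int) (s : String) : Int :=
  if s.toList.contains '(' then cubCount d s.toList else d

-- reference form of A's combine_index, recursively over the list with an index offset
def cubPairsFrom (d : Int) (off : Nat) : List String → List (Nat × Nat)
  | [] => []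
  | s :: t => (if d > 0 then [(off - 1, off)] else []) ++ cubPairsFrom (cubStep d s) (off + 1) t

-- reference form of the grouped output: cur is the group being built, d the depth before the next item
def cubGrp (d : Int) (cur : String) : List String → List String
  | [] => [cur]
  | s :: t => if d > 0 then cubGrp (cubStep d s) (cur ++ s) t else cur :: cubGrp (cubStep d s) s t

theorem cubGrp_ne_nil (d : Int) (cur : String) (l : List String) : cubGrp d cur l ≠ [] := by
  induction l generalizing d cur with
  | nil => simp [cubGrp]
  | cons s t ih =>
    by_cases h : d > 0 <;> simp [cubGrp, h]
    exact ih _ _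

theorem cubGrp_prepend (l : List String) (d : Int) (a b : String) :
    cubGrp d (a ++ b) l = (a ++ (cubGrp d b l).headD "") :: (cubGrp d b l).tail := by
  induction l generalizing d b with
  | nil => simp [cubGrp]
  | cons s t ih =>
    by_cases h : d > 0
    · simp only [cubGrp, h, if_true]
      rw [String.append_assoc]
      exact ih _ _
    · simp [cubGrp, h]

theorem cubScanA_aux (full : List String) (l pre : List String) (d : Int) (acc : List (Nat × Nat))
    (hfull : full = pre ++ l) :
    ((List.range' pre.length l.length).foldl
      (fun st index =>
        let string := full.getD index ""
        let ci := if st.1 > 0 then st.2 ++ [(index - 1, index)] else st.2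
        if string.toList.contains '(' then (cubCount st.1 string.toList, ci) else (st.1, ci))
      (d, acc)).2 = acc ++ cubPairsFrom d pre.length l := by
  induction l generalizing pre d acc with
  | nil => simp [cubPairsFrom]
  | cons s t ih =>
    have hget : full.getD pre.length "" = s := by
      subst hfull; simp [List.getD]
    rw [List.length_cons, List.range'_succ, List.foldl_cons]
    have hrec := ih (pre ++ [s]) (cubStep d s)
        (if d > 0 then acc ++ [(pre.length - 1, pre.length)] else acc)
        (by simpa using hfull)
    simp only [List.length_append, List.length_singleton] at hrec
    by_cases hc : '(' ∈ s.toList <;> by_cases h : d > 0 <;>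
      simp only [cubStep, List.contains_iff_mem, hc, h, if_true, if_false, gt_iff_lt,
        hget] at hrec ⊢ <;>
      rw [hrec] <;> simp [cubPairsFrom, cubStep, hc, h]

theorem cubScanA_eq (arg_list : List String) :
    (cubScanA arg_list).2 = cubPairsFrom 0 0 arg_list := by
  have := cubScanA_aux arg_list arg_list [] 0 [] rfl
  simpa [cubScanA, List.range_eq_range'] using this

-- the effect of one reversed-merge step at the boundary position
theorem cubMergeStep (pre : List String) (cur h : String) (r : List String) :
    ((pre ++ cur :: h :: r).modify pre.length
        (fun x => x ++ (pre ++ cur :: h :: r).getD (pre.length + 1) "")).take (pre.length + 1)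
      ++ ((pre ++ cur :: h :: r).modify pre.length
        (fun x => x ++ (pre ++ cur :: h :: r).getD (pre.length + 1) "")).drop (pre.length + 1 + 1)
      = pre ++ (cur ++ h) :: r := by
  induction pre with
  | nil => simp [List.modify, List.getD]
  | cons p pre ih =>
    simp only [List.cons_append, List.length_cons, List.modify, List.getD,
      List.getElem?_cons_succ, List.modifyTailIdx_succ_cons, List.take_succ_cons,
      List.drop_succ_cons] at ih ⊢
    rw [ih]

theorem cubMergeA_grp (l : List String) (d : Int) (cur : String) (pre : List String) :
    cubMergeA (pre ++ cur :: l) (cubPairsFrom d (pre.length + 1) l).reverse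
      = pre ++ cubGrp d cur l := by
  induction l generalizing d cur pre with
  | nil => simp [cubMergeA, cubPairsFrom, cubGrp]
  | cons s t ih =>
    have ih' := ih (cubStep d s) s (pre ++ [cur])
    simp only [List.length_append, List.length_singleton, List.append_assoc, List.cons_append,
      List.nil_append] at ih'
    by_cases h : d > 0
    · have hne := cubGrp_ne_nil (cubStep d s) s t
      cases hm : cubGrp (cubStep d s) s t with
      | nil => exact absurd hm hne
      | cons h0 r =>
        rw [hm] at ih'
        simp only [cubPairsFrom, h, if_true, List.singleton_append,
          List.reverse_cons]
        unfold cubMergeA at ih' ⊢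
        rw [List.foldl_append, ih']
        simp only [List.foldl_cons, List.foldl_nil, Nat.add_sub_cancel]
        rw [cubMergeStep pre cur h0 r]
        simp only [cubGrp, h, if_true]
        rw [cubGrp_prepend, hm]
        simp
    · simp only [cubPairsFrom, h, if_false, List.nil_append]
      have ih2 := ih (cubStep d s) s (pre ++ [cur])
      simp only [List.length_append, List.length_singleton, List.append_assoc, List.cons_append,
        List.nil_append] at ih2
      rw [ih2]
      simp [cubGrp, h]

theorem cubFoldB (l : List String) (d : Int) (cur : String) (acc : List String) :
    ((l.foldl cubStepB (d, cur :: acc)).2).reverse = acc.reverse ++ cubGrp d cur l := by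
  induction l generalizing d cur acc with
  | nil => simp [cubGrp]
  | cons s t ih =>
    by_cases h : d > 0
    · simp only [List.foldl_cons, cubStepB, h, decide_true]
      rw [ih]
      simp [cubGrp, cubStep, h]
    · simp only [List.foldl_cons, cubStepB, h, decide_false]
      rw [ih _ _ (cur :: acc)]
      simp [cubGrp, cubStep, h]

theorem cub_eq (arg_list : List String) :
    combine_until_closing_bracket arg_list = combine_until_closing_bracket_alt arg_list := by
  cases arg_list with
  | nil => decide
  | cons s t =>
    unfold combine_until_closing_bracket combine_until_closing_bracket_alt
    rw [cubScanA_eq]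
    simp only [cubPairsFrom, show ¬ ((0:Int) > 0) by decide, if_false, List.nil_append]
    have hA := cubMergeA_grp t (cubStep 0 s) s []
    simp only [List.length_nil, List.nil_append, Nat.zero_add] at hA
    rw [hA]
    have hB : (t.foldl cubStepB (cubStepB (0, []) s)).2.reverse = cubGrp (cubStep 0 s) s t := by
      have := cubFoldB t (cubStep 0 s) s []
      simpa [cubStepB, cubStep] using this
    simp only [List.foldl_cons]
    rw [hB]

-- ===== VERDICT (by name: the statement is the Claim_ definition above) =====
theorem combine_until_closing_bracket_spec : Claim_equal_combine_until_closing_bracket := by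
  intro arg_list _ _
  unfold Spec_combine_until_closing_bracket
  exact cub_eq arg_list
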